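-- pv_equiv track=rewrite | github.com/Rvioleck/python_noj_exmination | noj_042非负累加.py | vector_sum
-- ===== SOURCE A (Python) =====
-- def vector_sum(num, sum_):
--     memo = [[0 for _ in range(sum_+1)] for __ in range(num+1)]
--     for i in range(num+1):
--         memo[i][0]= 1
--         for n in range(1, num+1):
--             for s in range(1, sum_+1):
--                 memo[n][s]= sum(memo[n-1][s-i] for i in range(s+1))
--     return memo[num][sum_]
-- ===== SOURCE B (Python) =====
-- def vector_sum(num, sum_):
--     # single bottom-up DP: each row is the running prefix sums of the previous row
--     row = [1] + [0] * sum_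
--     for _ in range(num):
--         acc = 0
--         new = []
--         for x in row:
--             acc += x
--             new.append(acc)
--         row = new
--     return row[sum_]
-- ===== Notes on version B (the rewrite author's own statement) =====
-- stated objective: faster
-- what changed: Replaced the redundant outer re-computation loop and the per-cell inner summation by a single bottom-up DP that keeps one row and replaces it num times by its running prefix sums.
import Mathlib
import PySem

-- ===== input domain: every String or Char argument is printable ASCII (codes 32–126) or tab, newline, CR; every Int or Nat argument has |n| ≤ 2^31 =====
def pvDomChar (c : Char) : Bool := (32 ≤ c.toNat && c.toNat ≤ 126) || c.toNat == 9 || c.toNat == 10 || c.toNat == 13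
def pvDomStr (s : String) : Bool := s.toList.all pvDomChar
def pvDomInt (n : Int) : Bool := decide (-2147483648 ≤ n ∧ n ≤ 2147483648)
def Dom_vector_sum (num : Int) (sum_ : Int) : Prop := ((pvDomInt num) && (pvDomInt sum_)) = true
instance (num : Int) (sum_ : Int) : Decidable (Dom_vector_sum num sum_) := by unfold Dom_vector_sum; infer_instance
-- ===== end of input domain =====

-- B replaces A's redundant outer re-computation loop and per-cell summation by a single
-- bottom-up DP that repeatedly takes running prefix sums of one row (objective: faster).


-- ===== PORT A =====
-- sum(memo[n-1][s-i] for i in range(s+1)); indices s-i are in range under Pre_, getD is exact there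
def pvInnerSum (prev : List Int) (s : Nat) : Int :=
  (List.range (s + 1)).foldl (fun a i => a + prev.getD (s - i) 0) 0

-- body of the loop 'for s in range(1, sum_+1): memo[n][s] = …' (s = s' + 1)
def pvF (n : Nat) (m : List (List Int)) (s' : Nat) : List (List Int) :=
  m.set n ((m.getD n []).set (s' + 1) (pvInnerSum (m.getD (n - 1) []) (s' + 1)))

def pvStepS (m : List (List Int)) (n S : Nat) : List (List Int) :=
  (List.range S).foldl (pvF n) m

-- 'for n in range(1, num+1): …' (n = n' + 1)
def pvStepN (m : List (List Int)) (numT S : Nat) : List (List Int) :=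
  (List.range numT).foldl (fun m n' => pvStepS m (n' + 1) S) m

-- all list indices are nonnegative and in range under Pre_ (num ≥ 0, sum_ ≥ 0); the port is exact there
def vector_sum (num : Int) (sum_ : Int) : Int :=
  let memo0 := List.replicate (num + 1).toNat (List.replicate (sum_ + 1).toNat (0 : Int))
  let memo := (List.range (num + 1).toNat).foldl
      (fun m i => pvStepN (m.set i ((m.getD i []).set 0 1)) num.toNat sum_.toNat) memo0
  (memo.getD num.toNat []).getD sum_.toNat 0

-- ===== PORT B =====
-- the inner 'acc/new' loop of Source B: running prefix sums of row
def pvPrefix (row : List Int) : List Int :=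
  (row.foldl (fun (p : Int × List Int) x => (p.1 + x, p.2 ++ [p.1 + x])) (0, [])).2

def vector_sum_alt (num : Int) (sum_ : Int) : Int :=
  let row0 : List Int := 1 :: List.replicate sum_.toNat 0
  let row := (List.range num.toNat).foldl (fun r _ => pvPrefix r) row0
  row.getD sum_.toNat 0   -- row[sum_]: in range under Pre_, getD exact there

-- ===== PRECONDITION & SPEC =====
-- A raises IndexError whenever num < 0 or sum_ < 0 (empty memo / empty rows); excluded here.
def Pre_vector_sum (num : Int) (sum_ : Int) : Prop := 0 ≤ num ∧ 0 ≤ sum_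
instance (num : Int) (sum_ : Int) : Decidable (Pre_vector_sum num sum_) := by
  unfold Pre_vector_sum; infer_instance
def pvWitness_vector_sum : Int × Int := (2, 3)

def Spec_vector_sum (num : Int) (sum_ : Int) (out : Int) : Prop := out = vector_sum_alt num sum_
instance (num : Int) (sum_ : Int) (out : Int) : Decidable (Spec_vector_sum num sum_ out) := by
  unfold Spec_vector_sum; infer_instance

-- ===== CLAIM (what is proved, stated in full; the proofs are below) =====
def Claim_equal_vector_sum : Prop := ∀ (num : Int) (sum_ : Int), Dom_vector_sum num sum_ →
  Pre_vector_sum num sum_ → Spec_vector_sum num sum_ (vector_sum num sum_)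

-- ===== LEMMAS AND PROOFS =====

-- getD/set plumbing
theorem pv_getD_set_ne (l : List Int) (i j : Nat) (v d : Int) (h : i ≠ j) :
    (l.set i v).getD j d = l.getD j d := by
  simp [List.getD_eq_getElem?_getD, List.getElem?_set_ne h]

theorem pv_getD_set_self (l : List Int) (i : Nat) (v d : Int) (h : i < l.length) :
    (l.set i v).getD i d = v := by
  simp [List.getD_eq_getElem?_getD, h]

theorem pv_getD_set_ne' (l : List (List Int)) (i j : Nat) (v : List Int) (h : i ≠ j) :
    (l.set i v).getD j [] = l.getD j [] := by
  simp [List.getD_eq_getElem?_getD, List.getElem?_set_ne h]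

theorem pv_getD_set_self' (l : List (List Int)) (i : Nat) (v : List Int) (h : i < l.length) :
    (l.set i v).getD i [] = v := by
  simp [List.getD_eq_getElem?_getD, h]

-- mathematical reference: prefix sums and the DP rows
def pvPsums (a : Int) : List Int → List Int
  | [] => []
  | x :: xs => (a + x) :: pvPsums (a + x) xs

def pvR (S : Nat) : Nat → List Int
  | 0 => 1 :: List.replicate S 0
  | n + 1 => pvPsums 0 (pvR S n)

def pvSsum (l : List Int) (s : Nat) : Int := ∑ j ∈ Finset.range (s + 1), l.getD j 0

theorem pvPsums_length (l : List Int) : ∀ a, (pvPsums a l).length = l.length := by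
  induction l with
  | nil => intro a; rfl
  | cons x xs ih => intro a; simp [pvPsums, ih]

theorem pvPsums_getD (l : List Int) : ∀ a s, s < l.length →
    (pvPsums a l).getD s 0 = a + pvSsum l s := by
  induction l with
  | nil => intro a s h; simp at h
  | cons x xs ih =>
    intro a s h
    cases s with
    | zero => simp [pvPsums, pvSsum]
    | succ s =>
      have hs : s < xs.length := by simpa using h
      have := ih (a + x) s hs
      simp only [pvPsums, List.getD_cons_succ, this, pvSsum]
      have hsplit : ∑ j ∈ Finset.range (s + 2), (x :: xs).getD j 0
          = (∑ j ∈ Finset.range (s + 1), (x :: xs).getD (j + 1) 0) + (x :: xs).getD 0 0 :=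
        Finset.sum_range_succ' _ _
      simp only [List.getD_cons_succ, List.getD_cons_zero] at hsplit
      rw [hsplit]; ring

theorem pvR_length (S : Nat) : ∀ n, (pvR S n).length = S + 1 := by
  intro n
  induction n with
  | zero => simp [pvR]
  | succ n ih => simp [pvR, pvPsums_length, ih]

theorem pvR_zero (S : Nat) : ∀ n, (pvR S n).getD 0 0 = 1 := by
  intro n
  induction n with
  | zero => simp [pvR]
  | succ n ih =>
    have hlen : 0 < (pvR S n).length := by rw [pvR_length]; omega
    have := pvPsums_getD (pvR S n) 0 0 hlen
    simp only [pvR, this, pvSsum]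
    simpa using ih

-- pvInnerSum is the prefix sum of the previous row
theorem pv_foldl_range_add (f : Nat → Int) : ∀ k a,
    (List.range k).foldl (fun b i => b + f i) a = a + ∑ i ∈ Finset.range k, f i := by
  intro k
  induction k with
  | zero => intro a; simp
  | succ k ih =>
    intro a
    rw [List.range_succ, List.foldl_append, ih, Finset.sum_range_succ]
    simp only [List.foldl_cons, List.foldl_nil]
    rw [add_assoc]

theorem pvInnerSum_eq (prev : List Int) (s : Nat) : pvInnerSum prev s = pvSsum prev s := by
  unfold pvInnerSum pvSsum
  rw [pv_foldl_range_add (fun i => prev.getD (s - i) 0) (s + 1) 0]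
  have := Finset.sum_range_reflect (fun j => prev.getD j 0) (s + 1)
  simp only [Nat.add_sub_cancel] at this
  simpa using this

-- B computes pvR
theorem pvPrefix_spec (l : List Int) : ∀ a acc,
    (l.foldl (fun (p : Int × List Int) x => (p.1 + x, p.2 ++ [p.1 + x])) (a, acc)).2
      = acc ++ pvPsums a l := by
  induction l with
  | nil => intro a acc; simp [pvPsums]
  | cons x xs ih => intro a acc; simp [pvPsums, ih]

theorem pvPrefix_eq (l : List Int) : pvPrefix l = pvPsums 0 l := by
  unfold pvPrefix; rw [pvPrefix_spec]; simp

theorem alt_eq_pvR (num sum_ : Int) :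
    vector_sum_alt num sum_ = (pvR sum_.toNat num.toNat).getD sum_.toNat 0 := by
  unfold vector_sum_alt
  have h : ∀ k, (List.range k).foldl (fun r _ => pvPrefix r)
      ((1 : Int) :: List.replicate sum_.toNat 0) = pvR sum_.toNat k := by
    intro k
    induction k with
    | zero => simp [pvR]
    | succ k ih =>
      rw [List.range_succ, List.foldl_append, ih]
      simp [pvR, pvPrefix_eq]
  simp [h]

-- stepS preservation: rows other than n untouched, lengths and entry 0 preserved
theorem pvStepS_pres (n : Nat) : ∀ (l : List Nat) (m : List (List Int)),
    (l.foldl (pvF n) m).length = m.length ∧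
    (∀ k, k ≠ n → (l.foldl (pvF n) m).getD k [] = m.getD k []) ∧
    ((l.foldl (pvF n) m).getD n []).length = (m.getD n []).length ∧
    ((l.foldl (pvF n) m).getD n []).getD 0 0 = (m.getD n []).getD 0 0 := by
  intro l
  induction l with
  | nil => intro m; exact ⟨rfl, fun _ _ => rfl, rfl, rfl⟩
  | cons s' rest ih =>
    intro m
    obtain ⟨ih1, ih2, ih3, ih4⟩ := ih (pvF n m s')
    by_cases hn : n < m.length
    · have hrow : (pvF n m s').getD n [] = (m.getD n []).set (s' + 1)
          (pvInnerSum (m.getD (n - 1) []) (s' + 1)) := pv_getD_set_self' _ _ _ hn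
      refine ⟨?_, ?_, ?_, ?_⟩
      · rw [List.foldl_cons, ih1]; simp [pvF]
      · intro k hk
        rw [List.foldl_cons, ih2 k hk, pvF, pv_getD_set_ne' _ _ _ _ (Ne.symm hk)]
      · rw [List.foldl_cons, ih3, hrow]; simp
      · rw [List.foldl_cons, ih4, hrow, pv_getD_set_ne _ _ _ _ _ (by omega)]
    · have hid : pvF n m s' = m := by
        unfold pvF; exact List.set_eq_of_length_le (by omega)
      rw [hid] at ih1 ih2 ih3 ih4
      simp only [List.foldl_cons, hid]
      exact ⟨ih1, ih2, ih3, ih4⟩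

theorem pvStepN_succ (m : List (List Int)) (t S : Nat) :
    pvStepN m (t + 1) S = pvStepS (pvStepN m t S) (t + 1) S := by
  unfold pvStepN
  rw [List.range_succ, List.foldl_append]
  rfl

theorem pvStepN_pres (m : List (List Int)) (S : Nat) : ∀ t,
    (pvStepN m t S).length = m.length ∧
    (∀ k, ((pvStepN m t S).getD k []).length = (m.getD k []).length) ∧
    (∀ k, ((pvStepN m t S).getD k []).getD 0 0 = (m.getD k []).getD 0 0) ∧
    (∀ k, (k = 0 ∨ t < k) → (pvStepN m t S).getD k [] = m.getD k []) := by
  intro t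
  induction t with
  | zero => exact ⟨rfl, fun _ => rfl, fun _ => rfl, fun _ _ => rfl⟩
  | succ t ih =>
    obtain ⟨ih1, ih2, ih3, ih4⟩ := ih
    obtain ⟨p1, p2, p3, p4⟩ := pvStepS_pres (t + 1) (List.range S) (pvStepN m t S)
    rw [pvStepN_succ]
    refine ⟨?_, ?_, ?_, ?_⟩
    · rw [show pvStepS (pvStepN m t S) (t+1) S = (List.range S).foldl (pvF (t+1)) (pvStepN m t S) from rfl, p1, ih1]
    · intro k
      by_cases hk : k = t + 1
      · subst hk
        rw [show pvStepS (pvStepN m t S) (t+1) S = (List.range S).foldl (pvF (t+1)) (pvStepN m t S) from rfl, p3, ih2]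
      · rw [show pvStepS (pvStepN m t S) (t+1) S = (List.range S).foldl (pvF (t+1)) (pvStepN m t S) from rfl, p2 k hk, ih2]
    · intro k
      by_cases hk : k = t + 1
      · subst hk
        rw [show pvStepS (pvStepN m t S) (t+1) S = (List.range S).foldl (pvF (t+1)) (pvStepN m t S) from rfl, p4, ih3]
      · rw [show pvStepS (pvStepN m t S) (t+1) S = (List.range S).foldl (pvF (t+1)) (pvStepN m t S) from rfl, p2 k hk, ih3]
    · intro k hk
      have hk' : k ≠ t + 1 := by omega
      rw [show pvStepS (pvStepN m t S) (t+1) S = (List.range S).foldl (pvF (t+1)) (pvStepN m t S) from rfl, p2 k hk', ih4 k (by omega)]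

-- the core computation of one inner s-loop: row n becomes the prefix sums of row n-1
theorem pvStepS_compute (m : List (List Int)) (n S np : Nat)
    (hn : n < m.length) (hn1 : 1 ≤ n)
    (hprev : m.getD (n - 1) [] = pvR S np)
    (hlen : (m.getD n []).length = S + 1)
    (h0 : (m.getD n []).getD 0 0 = 1) :
    (pvStepS m n S).getD n [] = pvR S (np + 1) := by
  -- invariant over the partial fold
  have key : ∀ t, t ≤ S →
      ((List.range t).foldl (pvF n) m).getD (n - 1) [] = pvR S np ∧
      ((List.range t).foldl (pvF n) m).length = m.length ∧
      (((List.range t).foldl (pvF n) m).getD n []).length = S + 1 ∧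
      (∀ s, s ≤ t → (((List.range t).foldl (pvF n) m).getD n []).getD s 0
          = (pvR S (np + 1)).getD s 0) := by
    intro t
    induction t with
    | zero =>
      intro _
      simp only [List.range_zero, List.foldl_nil]
      refine ⟨hprev, trivial, hlen, ?_⟩
      intro s hs
      have hs0 : s = 0 := by omega
      subst hs0
      rw [h0, pvR_zero]
    | succ t ih =>
      intro ht
      obtain ⟨i1, i2, i3, i4⟩ := ih (by omega)
      set mt := (List.range t).foldl (pvF n) m with hmt
      have hfold : (List.range (t + 1)).foldl (pvF n) m = pvF n mt t := by
        rw [List.range_succ, List.foldl_append]; rfl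
      have hnlt : n < mt.length := by omega
      have hrow : (pvF n mt t).getD n []
          = (mt.getD n []).set (t + 1) (pvInnerSum (mt.getD (n - 1) []) (t + 1)) :=
        pv_getD_set_self' _ _ _ hnlt
      refine ⟨?_, ?_, ?_, ?_⟩
      · rw [hfold, pvF, pv_getD_set_ne' _ n (n - 1) _ (by omega), i1]
      · rw [hfold, pvF]; simpa using i2
      · rw [hfold, hrow]; simpa using i3
      · intro s hs
        rw [hfold, hrow, i1]
        by_cases hst : s = t + 1
        · subst hst
          rw [pv_getD_set_self _ _ _ _ (by omega), pvInnerSum_eq]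
          have hplen : t + 1 < (pvR S np).length := by rw [pvR_length]; omega
          rw [show pvR S (np + 1) = pvPsums 0 (pvR S np) from rfl,
            pvPsums_getD _ _ _ hplen]
          ring
        · rw [pv_getD_set_ne _ _ _ _ _ (by omega)]
          exact i4 s (by omega)
  obtain ⟨_, _, f3, f4⟩ := key S (le_refl S)
  -- pointwise agreement on all indices < S+1 gives list equality
  have hps : pvStepS m n S = (List.range S).foldl (pvF n) m := rfl
  rw [hps]
  apply List.ext_getElem
  · rw [f3, pvR_length]
  · intro i h1 h2
    have hi : i < S + 1 := by rw [f3] at h1; exact h1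
    have hA := f4 i (by omega)
    rw [List.getD_eq_getElem _ 0 h1, List.getD_eq_getElem _ 0 h2] at hA
    exact hA

-- one full n-loop computes every row of the DP, given every row has its 0-entry seeded
theorem pvStepN_compute (m : List (List Int)) (numT S : Nat)
    (hN : m.length = numT + 1)
    (hlen : ∀ j, j < numT + 1 → (m.getD j []).length = S + 1)
    (h0row : m.getD 0 [] = pvR S 0)
    (h0 : ∀ j, j < numT + 1 → (m.getD j []).getD 0 0 = 1) :
    ∀ t, t ≤ numT → ∀ j, j ≤ t → (pvStepN m t S).getD j [] = pvR S j := by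
  intro t
  induction t with
  | zero =>
    intro _ j hj
    have : j = 0 := by omega
    subst this
    exact h0row
  | succ t ih =>
    intro ht j hj
    obtain ⟨q1, q2, q3, q4⟩ := pvStepN_pres m S t
    obtain ⟨p1, p2, p3, p4⟩ := pvStepS_pres (t + 1) (List.range S) (pvStepN m t S)
    rw [pvStepN_succ]
    by_cases hjt : j = t + 1
    · subst hjt
      have hrowkeep : (pvStepN m t S).getD (t + 1) [] = m.getD (t + 1) [] :=
        q4 (t + 1) (Or.inr (by omega))
      have : (pvStepS (pvStepN m t S) (t + 1) S).getD (t + 1) [] = pvR S (t + 1) := by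
        apply pvStepS_compute (pvStepN m t S) (t + 1) S t
        · omega
        · omega
        · have := ih (by omega) t (le_refl t)
          simpa using this
        · rw [hrowkeep]; exact hlen (t + 1) (by omega)
        · rw [hrowkeep]; exact h0 (t + 1) (by omega)
      exact this
    · rw [show pvStepS (pvStepN m t S) (t+1) S = (List.range S).foldl (pvF (t+1)) (pvStepN m t S) from rfl,
        p2 j hjt]
      exact ih (by omega) j (by omega)

-- the outer i-loop of A, as a named step
def pvG (numT S : Nat) (m : List (List Int)) (i : Nat) : List (List Int) :=
  pvStepN (m.set i ((m.getD i []).set 0 1)) numT S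

def pvMemo0 (numT S : Nat) : List (List Int) :=
  List.replicate (numT + 1) (List.replicate (S + 1) 0)

theorem pvMemo0_getD (numT S j : Nat) (hj : j < numT + 1) :
    (pvMemo0 numT S).getD j [] = List.replicate (S + 1) 0 := by
  simp [pvMemo0, List.getD_eq_getElem?_getD, hj]

theorem pv_set_replicate (S : Nat) :
    (List.replicate (S + 1) (0 : Int)).set 0 1 = pvR S 0 := by
  simp [List.replicate_succ, pvR]

-- invariant of the outer loop: after k ≥ 1 iterations, shapes are kept, row 0 is the base
-- row, and rows 0..k-1 have their 0-entry seeded to 1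
theorem pvOuter_inv (numT S : Nat) : ∀ k, 1 ≤ k → k ≤ numT + 1 →
    ((List.range k).foldl (pvG numT S) (pvMemo0 numT S)).length = numT + 1 ∧
    (∀ j, j < numT + 1 →
      (((List.range k).foldl (pvG numT S) (pvMemo0 numT S)).getD j []).length = S + 1) ∧
    ((List.range k).foldl (pvG numT S) (pvMemo0 numT S)).getD 0 [] = pvR S 0 ∧
    (∀ j, j < k →
      (((List.range k).foldl (pvG numT S) (pvMemo0 numT S)).getD j []).getD 0 0 = 1) := by
  intro k
  induction k with
  | zero => omega
  | succ k ih =>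
    intro _ hk
    by_cases hk0 : k = 0
    · subst hk0
      -- first iteration: memo[0][0] = 1 then a full recomputation
      have hfold : (List.range 1).foldl (pvG numT S) (pvMemo0 numT S)
          = pvG numT S (pvMemo0 numT S) 0 := by simp
      set m' := (pvMemo0 numT S).set 0 (((pvMemo0 numT S).getD 0 []).set 0 1) with hm'
      have hrow0 : m'.getD 0 [] = pvR S 0 := by
        rw [hm', pv_getD_set_self' _ _ _ (by simp [pvMemo0]),
          pvMemo0_getD numT S 0 (by omega), pv_set_replicate]
      have hm'len : m'.length = numT + 1 := by simp [hm', pvMemo0]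
      obtain ⟨q1, q2, q3, q4⟩ := pvStepN_pres m' S numT
      have hGl : pvG numT S (pvMemo0 numT S) 0 = pvStepN m' numT S := rfl
      rw [hfold, hGl]
      refine ⟨by rw [q1, hm'len], ?_, ?_, ?_⟩
      · intro j hj
        rw [q2 j]
        by_cases hj0 : j = 0
        · subst hj0; rw [hrow0, pvR_length]
        · rw [hm', pv_getD_set_ne' _ _ _ _ (fun h => hj0 h.symm),
            pvMemo0_getD numT S j hj]
          simp
      · rw [q4 0 (Or.inl rfl), hrow0]
      · intro j hj
        have : j = 0 := by omega
        subst this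
        rw [q3 0, hrow0, pvR_zero]
    · obtain ⟨i1, i2, i3, i4⟩ := ih (by omega) (by omega)
      set Mk := (List.range k).foldl (pvG numT S) (pvMemo0 numT S) with hMk
      have hfold : (List.range (k + 1)).foldl (pvG numT S) (pvMemo0 numT S)
          = pvG numT S Mk k := by
        rw [List.range_succ, List.foldl_append]; rfl
      set m' := Mk.set k ((Mk.getD k []).set 0 1) with hm'
      have hklt : k < Mk.length := by omega
      have hm'len : m'.length = numT + 1 := by rw [hm']; simpa using i1
      have hrowk : m'.getD k [] = (Mk.getD k []).set 0 1 := pv_getD_set_self' _ _ _ hklt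
      have hrow0 : m'.getD 0 [] = pvR S 0 := by
        rw [hm', pv_getD_set_ne' _ _ _ _ (by omega), i3]
      obtain ⟨q1, q2, q3, q4⟩ := pvStepN_pres m' S numT
      have hGl : pvG numT S Mk k = pvStepN m' numT S := rfl
      rw [hfold, hGl]
      refine ⟨by rw [q1, hm'len], ?_, ?_, ?_⟩
      · intro j hj
        rw [q2 j]
        by_cases hjk : j = k
        · rw [hjk, hrowk]
          simpa using i2 k (by omega)
        · rw [hm', pv_getD_set_ne' _ _ _ _ (fun h => hjk h.symm)]
          exact i2 j hj
      · rw [q4 0 (Or.inl rfl), hrow0]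
      · intro j hj
        rw [q3 j]
        by_cases hjk : j = k
        · rw [hjk, hrowk, pv_getD_set_self _ _ _ _ (by rw [i2 k (by omega)]; omega)]
        · rw [hm', pv_getD_set_ne' _ _ _ _ (fun h => hjk h.symm)]
          exact i4 j (by omega)

-- A computes pvR as well
theorem a_eq_pvR (num sum_ : Int) (h1 : 0 ≤ num) (h2 : 0 ≤ sum_) :
    vector_sum num sum_ = (pvR sum_.toNat num.toNat).getD sum_.toNat 0 := by
  unfold vector_sum
  set numT := num.toNat with hnumT
  set S := sum_.toNat with hS
  have e1 : (num + 1).toNat = numT + 1 := by omega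
  have e2 : (sum_ + 1).toNat = S + 1 := by omega
  simp only [e1, e2]
  have hmemo0 : List.replicate (numT + 1) (List.replicate (S + 1) (0 : Int))
      = pvMemo0 numT S := rfl
  rw [hmemo0]
  have hG : (fun (m : List (List Int)) i => pvStepN (m.set i ((m.getD i []).set 0 1)) numT S)
      = pvG numT S := rfl
  rw [hG]
  by_cases hnum0 : numT = 0
  · obtain ⟨_, _, i3, _⟩ := pvOuter_inv numT S (numT + 1) (by omega) (by omega)
    rw [hnum0] at i3 ⊢
    rw [i3]
  · -- final iteration: every 0-entry is seeded, so the n-loop computes every row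
    have hfold : (List.range (numT + 1)).foldl (pvG numT S) (pvMemo0 numT S)
        = pvG numT S ((List.range numT).foldl (pvG numT S) (pvMemo0 numT S)) numT := by
      rw [List.range_succ, List.foldl_append]; rfl
    obtain ⟨i1, i2, i3, i4⟩ := pvOuter_inv numT S numT (by omega) (by omega)
    set Mk := (List.range numT).foldl (pvG numT S) (pvMemo0 numT S) with hMk
    set m' := Mk.set numT ((Mk.getD numT []).set 0 1) with hm'
    have hklt : numT < Mk.length := by omega
    have hrowN : m'.getD numT [] = (Mk.getD numT []).set 0 1 := pv_getD_set_self' _ _ _ hklt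
    have hrow : (pvStepN m' numT S).getD numT [] = pvR S numT := by
      apply pvStepN_compute m' numT S
      · rw [hm']; simpa using i1
      · intro j hj
        by_cases hjk : j = numT
        · rw [hjk, hrowN]
          simpa using i2 numT (by omega)
        · rw [hm', pv_getD_set_ne' _ _ _ _ (fun h => hjk h.symm)]
          exact i2 j hj
      · rw [hm', pv_getD_set_ne' _ _ _ _ (by omega), i3]
      · intro j hj
        by_cases hjk : j = numT
        · rw [hjk, hrowN, pv_getD_set_self _ _ _ _ (by rw [i2 numT (by omega)]; omega)]
        · rw [hm', pv_getD_set_ne' _ _ _ _ (fun h => hjk h.symm)]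
          exact i4 j (by omega)
      · exact le_refl numT
      · exact le_refl numT
    rw [hfold]
    have hGl : pvG numT S Mk numT = pvStepN m' numT S := rfl
    rw [hGl, hrow]

-- ===== VERDICT (by name: the statement is the Claim_ definition above) =====
theorem vector_sum_spec : Claim_equal_vector_sum := by
  intro num sum_ _ hpre
  unfold Spec_vector_sum
  rw [a_eq_pvR num sum_ hpre.1 hpre.2, alt_eq_pvR]
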